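-- pv_equiv track=rewrite | github.com/JiechengMei/CS481PA2 | cs481_P02_A20439795_A.py | CM_deduction
-- ===== SOURCE A (Python) =====
-- def CM_deduction(_CM, _label):
--     _TP = _TN = _FP = _FN = 0
--     for i in range(len(_CM)):
--         for j in range(len(_CM[i])):
--             if i == j and i == _label:
--                 _TP += _CM[i][j]
--             elif i == _label and j != _label:
--                 _FN += _CM[i][j]
--             elif i != _label and j == _label:
--                 _FP += _CM[i][j]
--             elif i != _label and j != _label:
--                 _TN += _CM[i][j]
--     return [_TP, _FN, _FP, _TN]
-- ===== SOURCE B (Python) =====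
-- def CM_deduction(_CM, _label):
--     TP = FN = FP = TN = 0
--     for i, row in enumerate(_CM):
--         rowsum = sum(row)
--         col = sum(v for j, v in enumerate(row) if j == _label)
--         if i == _label:
--             TP += col
--             FN += rowsum - col
--         else:
--             FP += col
--             TN += rowsum - col
--     return [TP, FN, FP, TN]
-- ===== Notes on version B (the rewrite author's own statement) =====
-- stated objective: faster
-- what changed: A classifies every matrix cell individually with a four-way branch inside nested index loops; B makes one pass over the rows, collapsing each row into two aggregates (its sum via sum() and its label-column entry) and distributing them to the four counters with a single per-row branch.
import Mathlib
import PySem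

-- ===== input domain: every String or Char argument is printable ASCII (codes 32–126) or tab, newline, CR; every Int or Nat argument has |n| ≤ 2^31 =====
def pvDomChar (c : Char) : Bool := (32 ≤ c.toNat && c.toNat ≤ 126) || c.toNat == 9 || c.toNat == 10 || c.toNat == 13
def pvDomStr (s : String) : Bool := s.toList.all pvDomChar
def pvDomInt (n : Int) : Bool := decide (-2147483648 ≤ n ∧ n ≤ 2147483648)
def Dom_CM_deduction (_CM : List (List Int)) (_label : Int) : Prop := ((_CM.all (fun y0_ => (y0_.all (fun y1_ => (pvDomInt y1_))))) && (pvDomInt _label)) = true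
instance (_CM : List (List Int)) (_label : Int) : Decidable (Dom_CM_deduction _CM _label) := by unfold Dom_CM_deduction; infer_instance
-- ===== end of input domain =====

-- B replaces A's per-cell four-way classification inside nested index loops by one pass over the
-- rows, collapsing each row into two aggregates (row sum and label-column entry); objective: faster (constant factor, measured).

-- ===== PORT A =====
-- A's inner loop: for j in range(len(row)): classify row[j] given outer index i
def innerA (lab i : Int) (row : List Int) (s : Int × Int × Int × Int) : Int × Int × Int × Int :=
  (PySem.List.pyRange 0 (row.length : Int)).foldl (fun s j =>
    if i = j ∧ i = lab then (s.1 + PySem.List.pyGetD row j 0, s.2.1, s.2.2.1, s.2.2.2)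
    else if i = lab ∧ j ≠ lab then (s.1, s.2.1 + PySem.List.pyGetD row j 0, s.2.2.1, s.2.2.2)
    else if i ≠ lab ∧ j = lab then (s.1, s.2.1, s.2.2.1 + PySem.List.pyGetD row j 0, s.2.2.2)
    else if i ≠ lab ∧ j ≠ lab then (s.1, s.2.1, s.2.2.1, s.2.2.2 + PySem.List.pyGetD row j 0)
    else s) s

def CM_deduction (_CM : List (List Int)) (_label : Int) : List Int :=
  let st := (PySem.List.pyRange 0 (_CM.length : Int)).foldl
    (fun s i => innerA _label i (PySem.List.pyGetD _CM i []) s) ((0 : Int), (0 : Int), (0 : Int), (0 : Int))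
  [st.1, st.2.1, st.2.2.1, st.2.2.2]

-- ===== PORT B =====
-- one pass over enumerate(_CM): per row, the row sum and the label-column entry
-- (sum(v for j, v in enumerate(row) if j == _label)), distributed by a single branch on i == _label
def CM_deduction_alt (_CM : List (List Int)) (_label : Int) : List Int :=
  let st := _CM.zipIdx.foldl (fun s p =>
    let rowsum := p.1.sum
    let col := (((p.1.zipIdx).filter (fun q => decide ((q.2 : Int) = _label))).map Prod.fst).sum
    if (p.2 : Int) = _label then (s.1 + col, s.2.1 + (rowsum - col), s.2.2.1, s.2.2.2)
    else (s.1, s.2.1, s.2.2.1 + col, s.2.2.2 + (rowsum - col)))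
    ((0 : Int), (0 : Int), (0 : Int), (0 : Int))
  [st.1, st.2.1, st.2.2.1, st.2.2.2]

-- ===== PRECONDITION & SPEC =====
def Spec_CM_deduction (_CM : List (List Int)) (_label : Int) (out : List Int) : Prop := out = CM_deduction_alt _CM _label
instance (_CM : List (List Int)) (_label : Int) (out : List Int) : Decidable (Spec_CM_deduction _CM _label out) := by unfold Spec_CM_deduction; infer_instance

-- ===== CLAIM (what is proved, stated in full; the proofs are below) =====
def Claim_equal_CM_deduction : Prop := ∀ (_CM : List (List Int)) (_label : Int), Dom_CM_deduction _CM _label → Spec_CM_deduction _CM _label (CM_deduction _CM _label)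

-- ===== LEMMAS AND PROOFS =====

-- "for i in range(len(xs)): body(i, xs[i])" is a fold over xs.zipIdx
theorem foldl_pyRange_zipIdx {α β : Type} (f : β → Int → α → β) (d : α) :
    ∀ (xs pref : List α) (init : β),
    (PySem.List.pyRange (pref.length : Int) ((pref.length + xs.length : Nat) : Int)).foldl
        (fun acc i => f acc i (PySem.List.pyGetD (pref ++ xs) i d)) init
      = (xs.zipIdx pref.length).foldl (fun acc p => f acc (p.2 : Int) p.1) init := by
  intro xs
  induction xs with
  | nil =>
      intro pref init
      have hb : ((pref.length + ([] : List α).length : Nat) : Int) = (pref.length : Int) := by simp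
      rw [hb, PySem.List.pyRange_one_eq_nil le_rfl]
      simp
  | cons x xs ih =>
      intro pref init
      rw [PySem.List.pyRange_one_cons (by simp)]
      simp only [List.foldl_cons, List.zipIdx_cons]
      have h1 : PySem.List.pyGetD (pref ++ x :: xs) (pref.length : Int) d = x := by
        rw [PySem.List.pyGetD_natCast]
        simp [List.getD]
      rw [h1]
      have h2 := ih (pref ++ [x]) (f init (pref.length : Int) x)
      have e1 : ((pref ++ [x]).length : Int) = (pref.length : Int) + 1 := by simp
      have e2 : (((pref ++ [x]).length + xs.length : Nat) : Int)
          = ((pref.length + (x :: xs).length : Nat) : Int) := by simp; omega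
      have e3 : (pref ++ [x]) ++ xs = pref ++ x :: xs := by simp
      rw [e1, e2, e3] at h2
      rw [h2]
      simp

-- entry of `row` whose absolute position (positions numbered from k) equals lab, else 0
def cEnt (lab : Int) : Nat → List Int → Int
  | _, [] => 0
  | k, x :: xs => if (k : Int) = lab then x else cEnt lab (k + 1) xs

theorem cEnt_eq_zero (lab : Int) (row : List Int) : ∀ k : Nat, lab < (k : Int) →
    cEnt lab k row = 0 := by
  induction row with
  | nil => intro k _; rfl
  | cons x xs ih =>
      intro k hk
      simp only [cEnt, if_neg (by omega : ¬ ((k : Int) = lab))]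
      exact ih (k + 1) (by push_cast; omega)

-- B's filtered generator sum over enumerate(row) is cEnt
theorem colSel_eq_cEnt (lab : Int) (row : List Int) : ∀ k : Nat,
    ((((row.zipIdx k)).filter (fun q => decide ((q.2 : Int) = lab))).map Prod.fst).sum
      = cEnt lab k row := by
  induction row with
  | nil => intro k; rfl
  | cons x xs ih =>
      intro k
      simp only [List.zipIdx_cons, List.filter_cons, cEnt]
      by_cases h : (k : Int) = lab
      · rw [if_pos (by simpa using h), if_pos h, List.map_cons, List.sum_cons, ih (k + 1),
          cEnt_eq_zero lab xs (k + 1) (by push_cast; omega)]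
        ring
      · rw [if_neg (by simpa using h), if_neg h, ih (k + 1)]

theorem inner_zip (lab i : Int) (row : List Int) : ∀ (k : Nat) (s : Int × Int × Int × Int),
    (row.zipIdx k).foldl (fun s p =>
        if i = (p.2 : Int) ∧ i = lab then (s.1 + p.1, s.2.1, s.2.2.1, s.2.2.2)
        else if i = lab ∧ (p.2 : Int) ≠ lab then (s.1, s.2.1 + p.1, s.2.2.1, s.2.2.2)
        else if i ≠ lab ∧ (p.2 : Int) = lab then (s.1, s.2.1, s.2.2.1 + p.1, s.2.2.2)
        else if i ≠ lab ∧ (p.2 : Int) ≠ lab then (s.1, s.2.1, s.2.2.1, s.2.2.2 + p.1)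
        else s) s
      = if i = lab
        then (s.1 + cEnt lab k row, s.2.1 + row.sum - cEnt lab k row, s.2.2.1, s.2.2.2)
        else (s.1, s.2.1, s.2.2.1 + cEnt lab k row, s.2.2.2 + row.sum - cEnt lab k row) := by
  induction row with
  | nil =>
      intro k s
      simp only [List.zipIdx_nil, List.foldl_nil, cEnt, List.sum_nil]
      split_ifs <;> simp
  | cons x xs ih =>
      intro k s
      simp only [List.zipIdx_cons, List.foldl_cons, cEnt, List.sum_cons]
      rw [ih (k + 1)]
      have hk1 : lab < ((k + 1 : Nat) : Int) → cEnt lab (k + 1) xs = 0 :=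
        cEnt_eq_zero lab xs (k + 1)
      by_cases hkl : (k : Int) = lab <;> by_cases hil : i = lab
      · rw [if_pos (⟨by omega, hil⟩ : i = (k : Int) ∧ i = lab), if_pos hil, if_pos hil, if_pos hkl,
          hk1 (by push_cast; omega)]
        simp only [Prod.mk.injEq]
        and_intros <;> (first | trivial | ring)
      · rw [if_neg (fun h : i = (k : Int) ∧ i = lab => hil h.2),
          if_neg (fun h : i = lab ∧ (k : Int) ≠ lab => hil h.1),
          if_pos (⟨hil, hkl⟩ : i ≠ lab ∧ (k : Int) = lab), if_neg hil, if_neg hil, if_pos hkl,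
          hk1 (by push_cast; omega)]
        simp only [Prod.mk.injEq]
        and_intros <;> (first | trivial | ring)
      · rw [if_neg (fun h : i = (k : Int) ∧ i = lab => hkl (by omega)),
          if_pos (⟨hil, hkl⟩ : i = lab ∧ (k : Int) ≠ lab), if_pos hil, if_pos hil, if_neg hkl]
        simp only [Prod.mk.injEq]
        and_intros <;> (first | trivial | ring)
      · rw [if_neg (fun h : i = (k : Int) ∧ i = lab => hil h.2),
          if_neg (fun h : i = lab ∧ (k : Int) ≠ lab => hil h.1),
          if_neg (fun h : i ≠ lab ∧ (k : Int) = lab => hkl h.2),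
          if_pos (⟨hil, hkl⟩ : i ≠ lab ∧ (k : Int) ≠ lab), if_neg hil, if_neg hil, if_neg hkl]
        simp only [Prod.mk.injEq]
        and_intros <;> (first | trivial | ring)

theorem inner_char (lab i : Int) (row : List Int) (s : Int × Int × Int × Int) :
    innerA lab i row s
      = if i = lab
        then (s.1 + cEnt lab 0 row, s.2.1 + row.sum - cEnt lab 0 row, s.2.2.1, s.2.2.2)
        else (s.1, s.2.1, s.2.2.1 + cEnt lab 0 row, s.2.2.2 + row.sum - cEnt lab 0 row) := by
  unfold innerA
  have h := foldl_pyRange_zipIdx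
    (fun (s : Int × Int × Int × Int) (j v : Int) =>
      if i = j ∧ i = lab then (s.1 + v, s.2.1, s.2.2.1, s.2.2.2)
      else if i = lab ∧ j ≠ lab then (s.1, s.2.1 + v, s.2.2.1, s.2.2.2)
      else if i ≠ lab ∧ j = lab then (s.1, s.2.1, s.2.2.1 + v, s.2.2.2)
      else if i ≠ lab ∧ j ≠ lab then (s.1, s.2.1, s.2.2.1, s.2.2.2 + v)
      else s) 0 row [] s
  simp only [List.length_nil, Nat.cast_zero, Nat.zero_add, List.nil_append] at h
  rw [h, inner_zip lab i row 0 s]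

-- A's per-row step (innerA) is exactly B's per-row step
theorem step_eq (lab : Int) :
    (fun (s : Int × Int × Int × Int) (p : List Int × Nat) => innerA lab (p.2 : Int) p.1 s)
      = (fun (s : Int × Int × Int × Int) (p : List Int × Nat) =>
          let rowsum := p.1.sum
          let col := (((p.1.zipIdx).filter (fun q => decide ((q.2 : Int) = lab))).map Prod.fst).sum
          if (p.2 : Int) = lab then (s.1 + col, s.2.1 + (rowsum - col), s.2.2.1, s.2.2.2)
          else (s.1, s.2.1, s.2.2.1 + col, s.2.2.2 + (rowsum - col))) := by
  funext s p
  rw [inner_char]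
  show _ = if (p.2 : Int) = lab
      then (s.1 + _, s.2.1 + (p.1.sum - _), s.2.2.1, s.2.2.2)
      else (s.1, s.2.1, s.2.2.1 + _, s.2.2.2 + (p.1.sum - _))
  rw [colSel_eq_cEnt lab p.1 0]
  by_cases h : (p.2 : Int) = lab
  · rw [if_pos h, if_pos h]
    simp only [Prod.mk.injEq]
    and_intros <;> (first | trivial | ring)
  · rw [if_neg h, if_neg h]
    simp only [Prod.mk.injEq]
    and_intros <;> (first | trivial | ring)

-- ===== VERDICT (by name: the statement is the Claim_ definition above) =====
theorem CM_deduction_spec : Claim_equal_CM_deduction := by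
  intro CM lab _
  unfold Spec_CM_deduction CM_deduction CM_deduction_alt
  have houter := foldl_pyRange_zipIdx
    (fun (s : Int × Int × Int × Int) (i : Int) (row : List Int) => innerA lab i row s)
    [] CM [] ((0 : Int), (0 : Int), (0 : Int), (0 : Int))
  simp only [List.length_nil, Nat.cast_zero, Nat.zero_add, List.nil_append] at houter
  rw [houter, step_eq lab]
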